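-- pv_equiv track=rewrite | github.com/jeff-donovan/aoc-2024 | 9/9.2.py | get_free_space_index_for_file_size
-- ===== SOURCE A (Python) =====
-- def get_free_space_index_for_file_size(blocks, file_size):
--     blocks_as_string = ''
--     for block in blocks:
--         if block == '.':
--             blocks_as_string += '.'
--         else:
--             blocks_as_string += 'N'
--     return blocks_as_string.find('.' * file_size)
-- ===== SOURCE B (Python) =====
-- def get_free_space_index_for_file_size(blocks, file_size):
--     # single pass: count consecutive '.' run lengths, return index of first fitting run
--     if file_size <= 0:
--         return 0
--     run = 0
--     for i, block in enumerate(blocks):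
--         if block == '.':
--             run += 1
--             if run == file_size:
--                 return i - file_size + 1
--         else:
--             run = 0
--     return -1
-- ===== Notes on version B (the rewrite author's own statement) =====
-- stated objective: alternative
-- what changed: Replaced building a full '.'/'N' string and substring-searching for '.'*file_size with a single pass over blocks that counts the current run of '.' blocks and returns as soon as the run reaches file_size.
import Mathlib
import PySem

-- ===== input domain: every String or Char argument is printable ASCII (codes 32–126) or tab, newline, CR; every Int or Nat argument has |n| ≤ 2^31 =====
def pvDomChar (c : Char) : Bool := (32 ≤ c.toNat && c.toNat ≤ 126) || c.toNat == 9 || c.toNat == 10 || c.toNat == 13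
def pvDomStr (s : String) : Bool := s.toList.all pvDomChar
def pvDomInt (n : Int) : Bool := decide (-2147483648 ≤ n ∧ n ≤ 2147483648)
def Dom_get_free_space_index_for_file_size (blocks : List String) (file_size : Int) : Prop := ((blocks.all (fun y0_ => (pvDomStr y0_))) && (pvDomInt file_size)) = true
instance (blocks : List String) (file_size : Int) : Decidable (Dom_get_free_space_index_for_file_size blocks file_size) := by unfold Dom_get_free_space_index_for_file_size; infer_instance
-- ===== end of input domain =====

-- B replaces A's build-a-string-then-substring-search with a single pass over blocks counting the current run of '.' blocks (objective: alternative; not measurably faster on the timed inputs).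

-- ===== PORT A =====
-- the Python string of '.'/'N' characters is modeled as List Char (PySem.Chars); str.find → PySem.Chars.find, '.' * file_size → PySem.List.pyRepeat
def get_free_space_index_for_file_size (blocks : List String) (file_size : Int) : Int :=
  let blocks_as_string : List Char :=
    blocks.foldl (fun acc block => if block = "." then acc ++ ['.'] else acc ++ ['N']) []
  PySem.Chars.find blocks_as_string (PySem.List.pyRepeat ['.'] file_size)

-- ===== PORT B =====
def pvAltGo : List String → Int → Int → Int → Int
  | [], _, _, _ => -1
  | block :: rest, file_size, i, run =>
    if block = "." then
      (if run + 1 = file_size then i - file_size + 1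
       else pvAltGo rest file_size (i + 1) (run + 1))
    else pvAltGo rest file_size (i + 1) 0

def get_free_space_index_for_file_size_alt (blocks : List String) (file_size : Int) : Int :=
  if file_size ≤ 0 then 0 else pvAltGo blocks file_size 0 0

-- ===== PRECONDITION & SPEC =====
def Spec_get_free_space_index_for_file_size (blocks : List String) (file_size : Int) (out : Int) : Prop := out = get_free_space_index_for_file_size_alt blocks file_size
instance (blocks : List String) (file_size : Int) (out : Int) : Decidable (Spec_get_free_space_index_for_file_size blocks file_size out) := by unfold Spec_get_free_space_index_for_file_size; infer_instance

-- ===== CLAIM (what is proved, stated in full; the proofs are below) =====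
def Claim_equal_get_free_space_index_for_file_size : Prop := ∀ (blocks : List String) (file_size : Int), Dom_get_free_space_index_for_file_size blocks file_size → Spec_get_free_space_index_for_file_size blocks file_size (get_free_space_index_for_file_size blocks file_size)

-- ===== LEMMAS AND PROOFS =====

def pvCharmap (blocks : List String) : List Char :=
  blocks.map (fun b => if b = "." then '.' else 'N')

theorem pv_foldl_charmap (l : List String) (init : List Char) :
    l.foldl (fun acc block => if block = "." then acc ++ ['.'] else acc ++ ['N']) init
      = init ++ pvCharmap l := by
  induction l generalizing init with
  | nil => simp [pvCharmap]
  | cons b rest ih => by_cases hb : b = "." <;> simp [pvCharmap, hb, ih]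

-- find points at the FIRST occurrence: uniqueness direction
theorem pv_find_eq_of (s pat : List Char) (j : ℕ)
    (h1 : pat <+: s.drop j) (h2 : ∀ i < j, ¬ pat <+: s.drop i) :
    PySem.Chars.find s pat = (j : Int) := by
  have hinf : pat <:+: s := by
    rw [← PySem.Chars.isIn_iff_infix, ← PySem.Chars.exists_prefix_drop_iff_isIn]
    exact ⟨j, h1⟩
  have hnn : 0 ≤ PySem.Chars.find s pat := (PySem.Chars.find_nonneg_iff s pat).mpr hinf
  obtain ⟨hp, hmin⟩ := PySem.Chars.find_spec hnn
  rcases lt_trichotomy (PySem.Chars.find s pat).toNat j with h | h | h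
  · exact absurd hp (h2 _ h)
  · omega
  · exact absurd h1 (hmin j h)

theorem pv_infix_iff_exists_drop (sub s : List Char) :
    sub <:+: s ↔ ∃ j, sub <+: s.drop j := by
  rw [← PySem.Chars.isIn_iff_infix, ← PySem.Chars.exists_prefix_drop_iff_isIn]

theorem pv_no_occ_low (r n j : ℕ) (cs : List Char) (hr : r < n) (hj : j ≤ r) :
    ¬ List.replicate n '.' <+: (List.replicate r '.' ++ 'N' :: cs).drop j := by
  intro hpre
  have hdrop : (List.replicate r '.' ++ 'N' :: cs).drop j
      = List.replicate (r - j) '.' ++ 'N' :: cs := by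
    rw [List.drop_append, List.drop_replicate]
    simp only [List.length_replicate]
    have h0' : j - r = 0 := by omega
    rw [h0', List.drop_zero]
  rw [hdrop] at hpre
  have hlt : r - j < (List.replicate n '.').length := by simp; omega
  have := hpre.getElem hlt
  rw [List.getElem_replicate, List.getElem_append_right (by simp)] at this
  simp at this

theorem pv_drop_high (r j : ℕ) (cs : List Char) :
    (List.replicate r '.' ++ 'N' :: cs).drop (r + 1 + j) = cs.drop j := by
  rw [List.drop_append, List.drop_replicate]
  simp only [List.length_replicate]
  have h1 : r - (r + 1 + j) = 0 := by omega
  have h2 : r + 1 + j - r = j + 1 := by omega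
  rw [h1, h2, List.replicate_zero, List.nil_append, List.drop_succ_cons]

theorem pv_find_N (r n : ℕ) (cs : List Char) (hr : r < n) :
    PySem.Chars.find (List.replicate r '.' ++ 'N' :: cs) (List.replicate n '.')
      = (if PySem.Chars.find cs (List.replicate n '.') = -1 then -1
         else (r : Int) + 1 + PySem.Chars.find cs (List.replicate n '.')) := by
  by_cases h : PySem.Chars.find cs (List.replicate n '.') = -1
  · rw [if_pos h, PySem.Chars.find_eq_neg_one_iff]
    rw [PySem.Chars.find_eq_neg_one_iff, pv_infix_iff_exists_drop] at h
    rw [pv_infix_iff_exists_drop]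
    rintro ⟨j, hj⟩
    by_cases hjr : j ≤ r
    · exact pv_no_occ_low r n j cs hr hjr hj
    · refine h ⟨j - r - 1, ?_⟩
      have : r + 1 + (j - r - 1) = j := by omega
      rw [← this, pv_drop_high] at hj
      exact hj
  · rw [if_neg h]
    have hnn : 0 ≤ PySem.Chars.find cs (List.replicate n '.') := by
      have := PySem.Chars.neg_one_le_find cs (List.replicate n '.')
      omega
    obtain ⟨hp, hmin⟩ := PySem.Chars.find_spec hnn
    set k := (PySem.Chars.find cs (List.replicate n '.')).toNat with hk
    have hfk : PySem.Chars.find cs (List.replicate n '.') = (k : Int) := by omega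
    rw [hfk]
    have := pv_find_eq_of (List.replicate r '.' ++ 'N' :: cs) (List.replicate n '.') (r + 1 + k)
      (by rw [pv_drop_high]; exact hp)
      (by
        intro i hi hpre
        by_cases hir : i ≤ r
        · exact pv_no_occ_low r n i cs hr hir hpre
        · have heq : r + 1 + (i - r - 1) = i := by omega
          rw [← heq, pv_drop_high] at hpre
          exact hmin (i - r - 1) (by omega) hpre)
    rw [this]
    push_cast
    ring

theorem pv_main (blocks : List String) (n : ℕ) (hn : 1 ≤ n) :
    ∀ (run : ℕ), run < n → ∀ i : Int,
      pvAltGo blocks (n : Int) i (run : Int)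
        = (if PySem.Chars.find (List.replicate run '.' ++ pvCharmap blocks) (List.replicate n '.') = -1 then -1
           else i - run + PySem.Chars.find (List.replicate run '.' ++ pvCharmap blocks) (List.replicate n '.')) := by
  induction blocks with
  | nil =>
    intro run hrun i
    have hnf : PySem.Chars.find (List.replicate run '.' ++ pvCharmap []) (List.replicate n '.') = -1 := by
      rw [PySem.Chars.find_eq_neg_one_iff]
      intro hinf
      have := hinf.length_le
      simp [pvCharmap] at this
      omega
    simp [pvAltGo, hnf]
  | cons b rest ih =>
    intro run hrun i
    by_cases hb : b = "."
    · rw [hb]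
      have hcm : pvCharmap ("." :: rest) = '.' :: pvCharmap rest := by simp [pvCharmap]
      by_cases heq : run + 1 = n
      · have hfind : PySem.Chars.find (List.replicate run '.' ++ pvCharmap ("." :: rest)) (List.replicate n '.') = ((0 : ℕ) : Int) := by
          apply pv_find_eq_of _ _ 0
          · rw [hcm, List.drop_zero]
            have : List.replicate run '.' ++ '.' :: pvCharmap rest
                = List.replicate n '.' ++ pvCharmap rest := by
              rw [← heq, List.replicate_succ']
              simp
            rw [this]
            exact List.prefix_append _ _
          · intro j hj; omega
        rw [hfind]
        simp only [pvAltGo, reduceIte]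
        have : ((run : Int) + 1 = (n : Int)) := by omega
        rw [if_pos this]
        simp
        omega
      · have hrun' : run + 1 < n := by omega
        have hne : ¬ ((run : Int) + 1 = (n : Int)) := by omega
        simp only [pvAltGo, reduceIte, if_neg hne]
        have hstep := ih (run + 1) hrun' (i + 1)
        have hrw : List.replicate (run + 1) '.' ++ pvCharmap rest
            = List.replicate run '.' ++ pvCharmap ("." :: rest) := by
          rw [hcm, List.replicate_succ']
          simp
        rw [hrw] at hstep
        push_cast at hstep ⊢
        rw [hstep]
        split
        · rfl
        · ring
    · have hcm : pvCharmap (b :: rest) = 'N' :: pvCharmap rest := by simp [pvCharmap, hb]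
      simp only [pvAltGo, if_neg hb]
      have hstep := ih 0 (by omega) (i + 1)
      simp only [List.replicate_zero, List.nil_append, Int.natCast_zero, Int.sub_zero] at hstep
      rw [hcm, pv_find_N run n (pvCharmap rest) hrun, hstep]
      by_cases hf : PySem.Chars.find (pvCharmap rest) (List.replicate n '.') = -1
      · simp [hf]
      · have hge : 0 ≤ PySem.Chars.find (pvCharmap rest) (List.replicate n '.') := by
          have := PySem.Chars.neg_one_le_find (pvCharmap rest) (List.replicate n '.')
          omega
        rw [if_neg hf, if_neg hf, if_neg (by omega : ¬ ((run : Int) + 1 + PySem.Chars.find (pvCharmap rest) (List.replicate n '.') = -1))]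
        ring

-- ===== VERDICT (by name: the statement is the Claim_ definition above) =====
theorem get_free_space_index_for_file_size_spec : Claim_equal_get_free_space_index_for_file_size := by
  intro blocks file_size _
  show _ = _
  unfold get_free_space_index_for_file_size get_free_space_index_for_file_size_alt
  rw [pv_foldl_charmap, PySem.List.pyRepeat_singleton, List.nil_append]
  by_cases hfs : file_size ≤ 0
  · have : file_size.toNat = 0 := by omega
    simp [hfs, this, PySem.Chars.find_nil]
  · have hn : 1 ≤ file_size.toNat := by omega
    have hfse : ((file_size.toNat : Int)) = file_size := by omega
    have hmain := pv_main blocks file_size.toNat hn 0 hn 0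
    simp only [List.replicate_zero, List.nil_append, Int.natCast_zero, Int.sub_zero] at hmain
    simp only [hfs, if_false, hfse] at *
    rw [hmain]
    split
    · rename_i h; rw [h]
    · ring
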